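-- pv_equiv track=rewrite | github.com/mingd00/Algorithm | 그리디/A-B_16953.py | a_to_b
-- ===== SOURCE A (Python) =====
-- def a_to_b(a, b):
--     count = 1
--     while(b!=a):
--         count += 1
--         target = b
--
--         if b % 10 == 1:
--             b //= 10
--         elif b % 2 == 0:
--             b //= 2
--         if target == b:
--             return -1
--     else:
--         return count
-- ===== SOURCE B (Python) =====
-- def a_to_b(a, b):
--     if a == b:
--         return 1
--     if b % 10 == 1:
--         nb = b // 10
--     elif b % 2 == 0:
--         nb = b // 2
--     else:
--         return -1
--     if nb == b:
--         return -1
--     r = a_to_b(a, nb)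
--     return -1 if r == -1 else r + 1
-- ===== Notes on version B (the rewrite author's own statement) =====
-- stated objective: alternative
-- what changed: Replaces A's mutating while-loop with an incrementing counter accumulator by a direct recursion on b's unique predecessor (b//10 if b%10==1 else b//2 if even), adding 1 to the recursive result on the way out and propagating -1.
import Mathlib
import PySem

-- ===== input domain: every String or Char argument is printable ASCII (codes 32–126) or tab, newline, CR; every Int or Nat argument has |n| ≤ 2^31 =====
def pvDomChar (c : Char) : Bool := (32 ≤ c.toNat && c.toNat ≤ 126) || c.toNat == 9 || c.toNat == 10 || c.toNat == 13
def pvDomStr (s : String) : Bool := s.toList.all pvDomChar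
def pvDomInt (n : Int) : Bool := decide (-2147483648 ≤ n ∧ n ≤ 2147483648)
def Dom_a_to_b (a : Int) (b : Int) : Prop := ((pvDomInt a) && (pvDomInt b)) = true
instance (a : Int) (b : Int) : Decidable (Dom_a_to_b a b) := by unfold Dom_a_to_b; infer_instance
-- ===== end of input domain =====

-- B replaces A's mutating while-loop/counter with a direct recursion on b's unique
-- predecessor, adding 1 on the way out (objective: alternative decomposition; same cost).

-- termination helper for port A (cited in decreasing_by)
theorem pv_stepA_lt (b b' : Int)
    (hdef : b' = if PySem.Int.mod b 10 = 1 then PySem.Int.floordiv b 10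
                 else if PySem.Int.mod b 2 = 0 then PySem.Int.floordiv b 2 else b)
    (hne : b ≠ b') : b'.natAbs < b.natAbs := by
  by_cases h1 : PySem.Int.mod b 10 = 1
  · rw [PySem.Int.mod_eq_emod_of_pos (by norm_num)] at h1
    rw [hdef, if_pos (by rw [PySem.Int.mod_eq_emod_of_pos (by norm_num)]; exact h1),
        PySem.Int.floordiv_eq_ediv_of_pos (by norm_num)]
    omega
  · by_cases h2 : PySem.Int.mod b 2 = 0
    · rw [PySem.Int.mod_eq_emod_of_pos (by norm_num)] at h2
      rw [hdef, if_neg h1, if_pos (by rw [PySem.Int.mod_eq_emod_of_pos (by norm_num)]; exact h2),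
          PySem.Int.floordiv_eq_ediv_of_pos (by norm_num)] at hne ⊢
      omega
    · rw [if_neg h1, if_neg h2] at hdef; exact absurd hdef.symm hne

-- termination helper for port B (cited in decreasing_by)
theorem pv_stepB_lt (b nb : Int)
    (h : (if PySem.Int.mod b 10 = 1 then some (PySem.Int.floordiv b 10)
          else if PySem.Int.mod b 2 = 0 then some (PySem.Int.floordiv b 2)
          else (none : Option Int)) = some nb)
    (hne : ¬ nb = b) : nb.natAbs < b.natAbs := by
  by_cases h1 : PySem.Int.mod b 10 = 1
  · rw [if_pos h1] at h
    rw [PySem.Int.mod_eq_emod_of_pos (by norm_num)] at h1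
    have : nb = PySem.Int.floordiv b 10 := (Option.some_inj.mp h).symm
    rw [this, PySem.Int.floordiv_eq_ediv_of_pos (by norm_num)]
    omega
  · by_cases h2 : PySem.Int.mod b 2 = 0
    · rw [if_neg h1, if_pos h2] at h
      rw [PySem.Int.mod_eq_emod_of_pos (by norm_num)] at h2
      have hnb : nb = PySem.Int.floordiv b 2 := (Option.some_inj.mp h).symm
      rw [hnb, PySem.Int.floordiv_eq_ediv_of_pos (by norm_num)] at hne ⊢
      omega
    · rw [if_neg h1, if_neg h2] at h; exact absurd h (by simp)

-- ===== PORT A =====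
-- the while-loop as structural recursion on b with the mutable count as accumulator
def a_to_b_go (a : Int) (b : Int) (count : Int) : Int :=
  if b = a then count
  else
    let b' := if PySem.Int.mod b 10 = 1 then PySem.Int.floordiv b 10
              else if PySem.Int.mod b 2 = 0 then PySem.Int.floordiv b 2 else b
    if _htgt : b = b' then -1 else a_to_b_go a b' (count + 1)
termination_by b.natAbs
decreasing_by exact pv_stepA_lt b b' rfl _htgt

def a_to_b (a : Int) (b : Int) : Int := a_to_b_go a b 1

-- ===== PORT B =====
def a_to_b_alt (a : Int) (b : Int) : Int :=
  if a = b then 1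
  else
    match _hm : (if PySem.Int.mod b 10 = 1 then some (PySem.Int.floordiv b 10)
                 else if PySem.Int.mod b 2 = 0 then some (PySem.Int.floordiv b 2)
                 else (none : Option Int)) with
    | none => -1
    | some nb =>
      if _hnb : nb = b then -1
      else
        let r := a_to_b_alt a nb
        if r = -1 then -1 else r + 1
termination_by b.natAbs
decreasing_by exact pv_stepB_lt b nb _hm _hnb

-- ===== PRECONDITION & SPEC =====
def Spec_a_to_b (a : Int) (b : Int) (out : Int) : Prop := out = a_to_b_alt a b
instance (a : Int) (b : Int) (out : Int) : Decidable (Spec_a_to_b a b out) := by unfold Spec_a_to_b; infer_instance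

-- ===== CLAIM (what is proved, stated in full; the proofs are below) =====
def Claim_equal_a_to_b : Prop := ∀ (a : Int) (b : Int), Dom_a_to_b a b → Spec_a_to_b a b (a_to_b a b)

-- ===== LEMMAS AND PROOFS =====

-- unfolding lemmas for B's port
theorem alt_base (a : Int) : a_to_b_alt a a = 1 := by
  rw [a_to_b_alt, if_pos rfl]

theorem alt_none (a b : Int) (h : ¬ a = b)
    (hm : (if PySem.Int.mod b 10 = 1 then some (PySem.Int.floordiv b 10)
           else if PySem.Int.mod b 2 = 0 then some (PySem.Int.floordiv b 2)
           else (none : Option Int)) = none) :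
    a_to_b_alt a b = -1 := by
  rw [a_to_b_alt, if_neg h]
  split
  · rfl
  · rename_i nb heq; rw [hm] at heq; cases heq

theorem alt_self (a b nb : Int) (h : ¬ a = b)
    (hm : (if PySem.Int.mod b 10 = 1 then some (PySem.Int.floordiv b 10)
           else if PySem.Int.mod b 2 = 0 then some (PySem.Int.floordiv b 2)
           else (none : Option Int)) = some nb) (hb : nb = b) :
    a_to_b_alt a b = -1 := by
  rw [a_to_b_alt, if_neg h]
  split
  · rename_i heq; rw [hm] at heq
  · rename_i nb' heq; rw [hm] at heq; cases heq; rw [dif_pos hb]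

theorem alt_some (a b nb : Int) (h : ¬ a = b)
    (hm : (if PySem.Int.mod b 10 = 1 then some (PySem.Int.floordiv b 10)
           else if PySem.Int.mod b 2 = 0 then some (PySem.Int.floordiv b 2)
           else (none : Option Int)) = some nb) (hnb : ¬ nb = b) :
    a_to_b_alt a b = (if a_to_b_alt a nb = -1 then -1 else a_to_b_alt a nb + 1) := by
  rw [a_to_b_alt, if_neg h]
  split
  · rename_i heq; rw [hm] at heq; cases heq
  · rename_i nb' heq; rw [hm] at heq; cases heq; rw [dif_neg hnb]

-- unfolding lemma for A's loop step
theorem go_step (a b count b' : Int) (h : ¬ b = a)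
    (hb' : (if PySem.Int.mod b 10 = 1 then PySem.Int.floordiv b 10
            else if PySem.Int.mod b 2 = 0 then PySem.Int.floordiv b 2 else b) = b') :
    a_to_b_go a b count = if b = b' then -1 else a_to_b_go a b' (count + 1) := by
  subst hb'
  rw [a_to_b_go, if_neg h]
  simp only [dite_eq_ite]

-- B never returns a value other than -1 or a positive count
theorem alt_cases (a : Int) : ∀ b : Int, a_to_b_alt a b = -1 ∨ 1 ≤ a_to_b_alt a b := by
  apply a_to_b_alt.induct (a := a)
    (motive := fun b => a_to_b_alt a b = -1 ∨ 1 ≤ a_to_b_alt a b)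
  · rw [alt_base]; right; norm_num
  · intro x h hm
    simp only [dite_eq_ite] at hm
    exact Or.inl (alt_none a x h hm)
  · intro nb h hm
    simp only [dite_eq_ite] at hm
    exact Or.inl (alt_self a nb nb h hm rfl)
  · intro x h nb hm hnb r hr ih
    have hrv : a_to_b_alt a nb = -1 := hr
    simp only [dite_eq_ite] at hm
    rw [alt_some a x nb h hm hnb, if_pos hrv]
    left; rfl
  · intro x h nb hm hnb r hr ih
    have hrv : ¬ a_to_b_alt a nb = -1 := hr
    simp only [dite_eq_ite] at hm
    rw [alt_some a x nb h hm hnb, if_neg hrv]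
    rcases ih with h1 | h1
    · exact absurd h1 hrv
    · right; omega

-- main invariant: the accumulator form of A equals B shifted by count - 1
theorem go_eq_alt (a : Int) : ∀ b : Int, ∀ count : Int,
    a_to_b_go a b count = (if a_to_b_alt a b = -1 then -1 else a_to_b_alt a b + count - 1) := by
  apply a_to_b_alt.induct (a := a)
    (motive := fun b => ∀ count : Int,
      a_to_b_go a b count = (if a_to_b_alt a b = -1 then -1 else a_to_b_alt a b + count - 1))
  · intro count
    rw [a_to_b_go, if_pos rfl, alt_base]
    norm_num
  · intro x h hm count
    -- predecessor undefined: the step leaves b unchanged, A returns -1; B returns -1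
    simp only [dite_eq_ite] at hm
    have hb' : (if PySem.Int.mod x 10 = 1 then PySem.Int.floordiv x 10
                else if PySem.Int.mod x 2 = 0 then PySem.Int.floordiv x 2 else x) = x := by
      split_ifs at hm ⊢ <;> simp_all
    rw [go_step a x count x (fun hxa => h hxa.symm) hb', if_pos rfl, alt_none a x h hm]
    simp
  · intro nb h hm count
    -- predecessor equals the current value (b = 0): both return -1
    simp only [dite_eq_ite] at hm
    have hb' : (if PySem.Int.mod nb 10 = 1 then PySem.Int.floordiv nb 10
                else if PySem.Int.mod nb 2 = 0 then PySem.Int.floordiv nb 2 else nb) = nb := by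
      split_ifs at hm ⊢ <;> simp_all
    rw [go_step a nb count nb (fun hxa => h hxa.symm) hb', if_pos rfl,
        alt_self a nb nb h hm rfl]
    simp
  · intro x h nb hm hnb r hr ih count
    -- recursive step where B's recursive call returns -1
    have hrv : a_to_b_alt a nb = -1 := hr
    simp only [dite_eq_ite] at hm
    have hb' : (if PySem.Int.mod x 10 = 1 then PySem.Int.floordiv x 10
                else if PySem.Int.mod x 2 = 0 then PySem.Int.floordiv x 2 else x) = nb := by
      split_ifs at hm ⊢ <;> simp_all
    rw [go_step a x count nb (fun hxa => h hxa.symm) hb',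
        if_neg (fun hxnb : x = nb => hnb hxnb.symm), ih, alt_some a x nb h hm hnb]
    simp [hrv]
  · intro x h nb hm hnb r hr ih count
    -- recursive step where B's recursive call returns a count
    have hrv : ¬ a_to_b_alt a nb = -1 := hr
    simp only [dite_eq_ite] at hm
    have hb' : (if PySem.Int.mod x 10 = 1 then PySem.Int.floordiv x 10
                else if PySem.Int.mod x 2 = 0 then PySem.Int.floordiv x 2 else x) = nb := by
      split_ifs at hm ⊢ <;> simp_all
    rw [go_step a x count nb (fun hxa => h hxa.symm) hb',
        if_neg (fun hxnb : x = nb => hnb hxnb.symm), ih, alt_some a x nb h hm hnb]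
    rcases alt_cases a nb with h1 | h1
    · exact absurd h1 hrv
    · rw [if_neg hrv, if_neg hrv, if_neg (by omega : ¬ a_to_b_alt a nb + 1 = -1)]
      omega

-- ===== VERDICT (by name: the statement is the Claim_ definition above) =====
theorem a_to_b_spec : Claim_equal_a_to_b := by
  intro a b _
  unfold Spec_a_to_b a_to_b
  rw [go_eq_alt a b 1]
  rcases alt_cases a b with h | h
  · simp [h]
  · have : a_to_b_alt a b ≠ -1 := by omega
    simp [this]
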